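-- pv_equiv track=rewrite | github.com/aaronnorrish/timetable_scheduler | timetable_scheduler.py | determine_used_days
-- ===== SOURCE A (Python) =====
-- def determine_used_days(timetable, n):
--     empty = [True, True, True, True, True]
--     for day in range(1, 6):
--         for timeslot in range(1, len(timetable), 2):
--             if(timetable[timeslot][day] != ""):
--                 empty[day - 1] = False
--                 break
--     return empty.count(False) <= int(n)
-- ===== SOURCE B (Python) =====
-- def determine_used_days(timetable, n):
--     mask = 0
--     for timeslot in range(1, len(timetable), 2):
--         row = timetable[timeslot]
--         mask |= sum(1 << day for day in range(1, 6) if row[day] != "")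
--     return mask.bit_count() <= int(n)
-- ===== Notes on version B (the rewrite author's own statement) =====
-- stated objective: alternative
-- what changed: Replaces the per-day boolean array built by day-outer scans with an early break by a timeslot-outer pass that ORs each row's used columns into an integer bitmask and compares its popcount (bit_count) to n.
-- outside the precondition, e.g. on determine_used_days([[], ['', 'x', 'x', 'x', 'x', 'x'], [], ['short']], 5): A returns True, B raises IndexError
import Mathlib
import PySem

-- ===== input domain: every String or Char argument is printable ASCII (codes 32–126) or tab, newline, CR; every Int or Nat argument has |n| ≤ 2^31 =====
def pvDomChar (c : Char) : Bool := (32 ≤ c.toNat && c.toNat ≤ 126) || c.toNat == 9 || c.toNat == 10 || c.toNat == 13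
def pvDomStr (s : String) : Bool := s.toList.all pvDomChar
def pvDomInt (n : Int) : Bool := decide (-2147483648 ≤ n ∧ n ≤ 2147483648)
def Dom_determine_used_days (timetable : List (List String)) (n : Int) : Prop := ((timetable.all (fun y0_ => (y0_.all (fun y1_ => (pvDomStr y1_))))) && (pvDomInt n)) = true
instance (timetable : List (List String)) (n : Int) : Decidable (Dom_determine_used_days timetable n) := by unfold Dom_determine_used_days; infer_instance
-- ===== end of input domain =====

-- B replaces A's day-outer scans with an early break over a per-day boolean array by a
-- timeslot-outer pass that ORs each row's used columns into an integer bitmask and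
-- compares its popcount to n (objective: alternative).

-- ===== PORT A =====
-- inner 'for timeslot in range(...)' loop of A for a fixed day, with its break
def dudInnerA (timetable : List (List String)) (day : Int) (e : List Bool) : List Int → List Bool
  | [] => e
  | t :: rest =>
    if ((PySem.List.pyGet? ((PySem.List.pyGet? timetable t).getD []) day).getD "") ≠ "" then
      e.set (day - 1).toNat false   -- day ∈ [1,5], so (day-1).toNat is exactly Python's empty[day-1]
    else dudInnerA timetable day e rest

def determine_used_days (timetable : List (List String)) (n : Int) : Bool :=
  let empty := (PySem.List.pyRange 1 6 1).foldl
    (fun e day => dudInnerA timetable day e (PySem.List.pyRange 1 timetable.length 2))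
    [true, true, true, true, true]
  decide (((empty.count false : Nat) : Int) ≤ n)

-- ===== PORT B =====
-- 'sum(1 << day for day in range(1, 6) if row[day] != "")': one row's used columns as a bitmask
-- (day ∈ [1,5], so '.toNat' on the shift amount is exact)
def dudRowMask (row : List String) : Int :=
  (((PySem.List.pyRange 1 6 1).filter
      (fun day => decide (((PySem.List.pyGet? row day).getD "") ≠ ""))).map
    (fun day => (1 : Int) <<< day.toNat)).sum

def determine_used_days_alt (timetable : List (List String)) (n : Int) : Bool :=
  let mask := (PySem.List.pyRange 1 timetable.length 2).foldl
    (fun m t => PySem.Int.bor m (dudRowMask ((PySem.List.pyGet? timetable t).getD []))) 0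
  decide (((PySem.Int.bitCount mask : Nat) : Int) ≤ n)

-- ===== PRECONDITION & SPEC =====
-- Pre_ excludes ragged timetables (an odd-indexed row with fewer than 6 cells): there A
-- raises IndexError except when every day's scan breaks on an earlier nonempty cell (an
-- accident of the break), and B's single pass raises IndexError on all of them.
def Pre_determine_used_days (timetable : List (List String)) (n : Int) : Prop :=
  ∀ i ∈ List.range timetable.length, i % 2 = 1 → 6 ≤ (timetable.getD i []).length
instance (timetable : List (List String)) (n : Int) : Decidable (Pre_determine_used_days timetable n) := by unfold Pre_determine_used_days; infer_instance

def pvWitness_determine_used_days : List (List String) × Int :=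
  ([["", "a", "", "", "", ""], ["", "x", "", "y", "", ""]], 2)

def Spec_determine_used_days (timetable : List (List String)) (n : Int) (out : Bool) : Prop := out = determine_used_days_alt timetable n
instance (timetable : List (List String)) (n : Int) (out : Bool) : Decidable (Spec_determine_used_days timetable n out) := by unfold Spec_determine_used_days; infer_instance

-- ===== CLAIM (what is proved, stated in full; the proofs are below) =====
def Claim_equal_determine_used_days : Prop := ∀ (timetable : List (List String)) (n : Int), Dom_determine_used_days timetable n → Pre_determine_used_days timetable n → Spec_determine_used_days timetable n (determine_used_days timetable n)

-- ===== LEMMAS AND PROOFS =====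
-- the cell test both programs apply to the row at timeslot t, day d
def dudCell (timetable : List (List String)) (t d : Int) : Bool :=
  decide (((PySem.List.pyGet? ((PySem.List.pyGet? timetable t).getD []) d).getD "") ≠ "")

-- whether day d is used at some odd timeslot
def dudUsed (timetable : List (List String)) (d : Int) : Bool :=
  (PySem.List.pyRange 1 timetable.length 2).any (fun t => dudCell timetable t d)

-- the bitmask of five day-bits (bit d set iff day d used)
def dudBits (b1 b2 b3 b4 b5 : Bool) : Nat :=
  (cond b1 2 0) + (cond b2 4 0) + (cond b3 8 0) + (cond b4 16 0) + (cond b5 32 0)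

lemma dudInnerA_eq (timetable : List (List String)) (d : Int) (e : List Bool) (ts : List Int) :
    dudInnerA timetable d e ts =
      if ts.any (fun t => dudCell timetable t d) then e.set (d - 1).toNat false else e := by
  induction ts with
  | nil => simp [dudInnerA]
  | cons t rest ih =>
    have hcell : (((PySem.List.pyGet? ((PySem.List.pyGet? timetable t).getD []) d).getD "") ≠ "")
        ↔ dudCell timetable t d = true := by simp [dudCell]
    simp only [dudInnerA, List.any_cons]
    by_cases h : dudCell timetable t d = true
    · rw [if_pos (hcell.mpr h)]
      simp [h]
    · rw [if_neg (fun hh => h (hcell.mp hh))]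
      rw [Bool.not_eq_true] at h
      simp [h, ih]

-- one row's mask is dudBits of its five cell tests
lemma dudRowMask_eq (row : List String) :
    dudRowMask row =
      ((dudBits (decide (((PySem.List.pyGet? row 1).getD "") ≠ ""))
                (decide (((PySem.List.pyGet? row 2).getD "") ≠ ""))
                (decide (((PySem.List.pyGet? row 3).getD "") ≠ ""))
                (decide (((PySem.List.pyGet? row 4).getD "") ≠ ""))
                (decide (((PySem.List.pyGet? row 5).getD "") ≠ "")) : Nat) : Int) := by
  have h16 : PySem.List.pyRange 1 6 1 = [1, 2, 3, 4, 5] := by decide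
  rw [dudRowMask, h16]
  by_cases h1 : (((PySem.List.pyGet? row 1).getD "") ≠ "") <;>
    by_cases h2 : (((PySem.List.pyGet? row 2).getD "") ≠ "") <;>
      by_cases h3 : (((PySem.List.pyGet? row 3).getD "") ≠ "") <;>
        by_cases h4 : (((PySem.List.pyGet? row 4).getD "") ≠ "") <;>
          by_cases h5 : (((PySem.List.pyGet? row 5).getD "") ≠ "") <;>
    simp [List.filter, h1, h2, h3, h4, h5, dudBits] <;> decide

-- B's fold of Int bitwise-ors of Nat casts is the cast of the Nat fold of |||
lemma dudFold_natCast (g : Int → Nat) (ts : List Int) (m : Nat) :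
    ts.foldl (fun m t => PySem.Int.bor m ((g t : Nat) : Int)) ((m : Nat) : Int) =
      ((ts.foldl (fun m t => m ||| g t) m : Nat) : Int) := by
  induction ts generalizing m with
  | nil => rfl
  | cons t rest ih => simp only [List.foldl_cons, PySem.Int.bor_natCast, ih]

-- a bit of the Nat ||| fold is set iff it is set initially or in some element
lemma dudTestBit_fold (g : Int → Nat) (ts : List Int) (m : Nat) (j : Nat) :
    (ts.foldl (fun m t => m ||| g t) m).testBit j =
      (m.testBit j || ts.any (fun t => (g t).testBit j)) := by
  induction ts generalizing m with
  | nil => simp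
  | cons t rest ih => simp [List.foldl_cons, ih, Nat.testBit_or, Bool.or_assoc]

lemma dudBits_testBit (b1 b2 b3 b4 b5 : Bool) :
    (dudBits b1 b2 b3 b4 b5).testBit 1 = b1 ∧ (dudBits b1 b2 b3 b4 b5).testBit 2 = b2 ∧
    (dudBits b1 b2 b3 b4 b5).testBit 3 = b3 ∧ (dudBits b1 b2 b3 b4 b5).testBit 4 = b4 ∧
    (dudBits b1 b2 b3 b4 b5).testBit 5 = b5 ∧ (dudBits b1 b2 b3 b4 b5) < 64 ∧
    (dudBits b1 b2 b3 b4 b5).testBit 0 = false := by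
  cases b1 <;> cases b2 <;> cases b3 <;> cases b4 <;> cases b5 <;> decide

-- B's final mask is dudBits of the five per-day 'used' facts
lemma dudMask_eq (timetable : List (List String)) :
    (PySem.List.pyRange 1 timetable.length 2).foldl
        (fun m t => PySem.Int.bor m (dudRowMask ((PySem.List.pyGet? timetable t).getD []))) 0 =
      ((dudBits (dudUsed timetable 1) (dudUsed timetable 2) (dudUsed timetable 3)
          (dudUsed timetable 4) (dudUsed timetable 5) : Nat) : Int) := by
  have hrw : ∀ t : Int, dudRowMask ((PySem.List.pyGet? timetable t).getD []) =
      ((dudBits (dudCell timetable t 1) (dudCell timetable t 2) (dudCell timetable t 3)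
          (dudCell timetable t 4) (dudCell timetable t 5) : Nat) : Int) := by
    intro t; rw [dudRowMask_eq]; rfl
  simp only [hrw]
  rw [show (0 : Int) = ((0 : Nat) : Int) from rfl,
    dudFold_natCast (fun t => dudBits (dudCell timetable t 1) (dudCell timetable t 2)
      (dudCell timetable t 3) (dudCell timetable t 4) (dudCell timetable t 5))]
  congr 1
  apply Nat.eq_of_testBit_eq
  intro j
  rw [dudTestBit_fold]
  rcases Nat.lt_or_ge j 6 with hj | hj
  · interval_cases j <;>
      simp only [Nat.zero_testBit, (dudBits_testBit _ _ _ _ _).1,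
        (dudBits_testBit _ _ _ _ _).2.1, (dudBits_testBit _ _ _ _ _).2.2.1,
        (dudBits_testBit _ _ _ _ _).2.2.2.1, (dudBits_testBit _ _ _ _ _).2.2.2.2.1,
        (dudBits_testBit _ _ _ _ _).2.2.2.2.2.2, Bool.false_or, dudUsed] <;> simp
  · have hlt : ∀ b1 b2 b3 b4 b5 : Bool, dudBits b1 b2 b3 b4 b5 < 2 ^ j := by
      intro b1 b2 b3 b4 b5
      calc dudBits b1 b2 b3 b4 b5 < 64 := (dudBits_testBit b1 b2 b3 b4 b5).2.2.2.2.2.1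
        _ ≤ 2 ^ j := by
          calc (64 : Nat) = 2 ^ 6 := by norm_num
            _ ≤ 2 ^ j := Nat.pow_le_pow_right (by norm_num) hj
    have : ∀ b1 b2 b3 b4 b5 : Bool, (dudBits b1 b2 b3 b4 b5).testBit j = false :=
      fun b1 b2 b3 b4 b5 => Nat.testBit_eq_false_of_lt (hlt b1 b2 b3 b4 b5)
    simp [this, Nat.zero_testBit]

-- popcount of dudBits is the number of set flags
lemma dudBitCount (b1 b2 b3 b4 b5 : Bool) :
    PySem.Int.bitCount ((dudBits b1 b2 b3 b4 b5 : Nat) : Int) =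
      (cond b1 1 0) + (cond b2 1 0) + (cond b3 1 0) + (cond b4 1 0) + (cond b5 1 0) := by
  cases b1 <;> cases b2 <;> cases b3 <;> cases b4 <;> cases b5 <;> decide

-- ===== VERDICT (by name: the statement is the Claim_ definition above) =====
theorem determine_used_days_spec : Claim_equal_determine_used_days := by
  intro timetable n _hdom _hpre
  show determine_used_days timetable n = determine_used_days_alt timetable n
  simp only [determine_used_days, determine_used_days_alt]
  rw [dudMask_eq, dudBitCount]
  have h16 : PySem.List.pyRange 1 6 1 = [1, 2, 3, 4, 5] := by decide
  rw [h16]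
  simp only [List.foldl_cons, List.foldl_nil, dudInnerA_eq]
  have e1 : ∀ d : Int, ((PySem.List.pyRange 1 timetable.length 2).any
      (fun t => dudCell timetable t d)) = dudUsed timetable d := fun _ => rfl
  simp only [e1]
  cases h1 : dudUsed timetable 1 <;> cases h2 : dudUsed timetable 2 <;>
    cases h3 : dudUsed timetable 3 <;> cases h4 : dudUsed timetable 4 <;>
    cases h5 : dudUsed timetable 5 <;>
  · simp [h1, h2, h3, h4, h5]
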